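-- pv_equiv track=rewrite | github.com/sjk623095-prog/CY300-coding-project | 10_practice_wpr1_solution.py | phonetic_encoder
-- ===== SOURCE A (Python) =====
-- def phonetic_encoder(s):
--     """
--     >>> phonetic_encoder("BAd13ACE2")
--     ['bravo', 'alpha', 'delta', 'won', 'tree', '<break>', 'alpha', 'charlie', 'echo', 'two']
--     >>> phonetic_encoder("abcde123")
--     ['alpha', 'bravo', 'charlie', 'delta', 'echo', '<break>', 'won', 'two', 'tree']
--     >>> phonetic_encoder("ZZ!1")
--     ['won']
--     """
--     # Map supported characters to NATO words.
--     alpha = {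
--         'a': 'alpha', 'b': 'bravo', 'c': 'charlie', 'd': 'delta', 'e': 'echo',
--         '1': 'won', '2': 'two', '3': 'tree'
--     }
--     tokens = []
--     for ch in s:
--         key = ch.lower()
--         if key in alpha:
--             tokens.append(alpha[key])
--
--     out = []
--     for idx in range(len(tokens)):
--         out.append(tokens[idx])
--         # Add <break> after each group of 5, except after the final group.
--         if ((idx + 1) % 5 == 0) and (idx != len(tokens) - 1):
--             out.append('<break>')
--     return out
-- ===== SOURCE B (Python) =====
-- def phonetic_encoder(s):
--     # Chunk-based rewrite: build tokens, then join 5-token slices with '<break>'.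
--     alpha = {
--         'a': 'alpha', 'b': 'bravo', 'c': 'charlie', 'd': 'delta', 'e': 'echo',
--         '1': 'won', '2': 'two', '3': 'tree'
--     }
--     tokens = [alpha[key] for key in (ch.lower() for ch in s) if key in alpha]
--     groups = [tokens[i:i + 5] for i in range(0, len(tokens), 5)]
--     if not groups:
--         return []
--     out = list(groups[0])
--     for group in groups[1:]:
--         out.append('<break>')
--         out.extend(group)
--     return out
-- ===== Notes on version B (the rewrite author's own statement) =====
-- stated objective: alternative
-- what changed: The element-wise modulo-counter break insertion is replaced by slicing the token list into chunks of 5 and joining the chunks with a single separator word between consecutive chunks; the filter-map first pass becomes a comprehension.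
import Mathlib
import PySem

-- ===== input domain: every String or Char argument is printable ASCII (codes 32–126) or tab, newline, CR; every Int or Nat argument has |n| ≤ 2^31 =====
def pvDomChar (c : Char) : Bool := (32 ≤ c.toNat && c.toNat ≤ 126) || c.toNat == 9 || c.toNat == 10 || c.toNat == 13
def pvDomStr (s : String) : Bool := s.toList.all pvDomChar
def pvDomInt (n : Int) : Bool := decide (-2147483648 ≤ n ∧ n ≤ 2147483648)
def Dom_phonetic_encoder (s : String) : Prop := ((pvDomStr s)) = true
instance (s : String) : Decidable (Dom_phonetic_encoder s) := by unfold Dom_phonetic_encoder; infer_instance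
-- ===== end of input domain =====

-- B replaces A's element-wise modulo-counter break insertion by slicing the
-- tokens into chunks of 5 and joining the chunks with '<break>' (alternative decomposition).

-- ===== PORT A =====
-- the NATO dictionary (one-character keys, kept as Char: Python iterates chars)
def pvAlpha : PySem.Dict Char String :=
  PySem.Dict.ofList
    [('a', "alpha"), ('b', "bravo"), ('c', "charlie"), ('d', "delta"), ('e', "echo"),
     ('1', "won"), ('2', "two"), ('3', "tree")]

def phonetic_encoder (s : String) : List String :=
  let tokens := s.toList.foldl (fun tokens ch =>
    let key := PySem.Chars.lowerChar ch
    match PySem.Dict.get? pvAlpha key with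
    | some w => tokens ++ [w]
    | none => tokens) []
  (PySem.List.pyRange 0 tokens.length 1).foldl (fun out idx =>
    let out := out ++ [PySem.List.pyGetD tokens idx ""]
    if PySem.Int.mod (idx + 1) 5 == 0 && idx != (tokens.length : Int) - 1 then
      out ++ ["<break>"]
    else out) []

-- ===== PORT B =====
def pvChunks5 (ts : List String) : List (List String) :=
  if h : ts = [] then [] else ts.take 5 :: pvChunks5 (ts.drop 5)
termination_by ts.length
decreasing_by
  have hpos : 0 < ts.length := List.length_pos_of_ne_nil h
  simp [List.length_drop]; omega

def phonetic_encoder_alt (s : String) : List String :=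
  let tokens := s.toList.filterMap (fun ch => PySem.Dict.get? pvAlpha (PySem.Chars.lowerChar ch))
  let groups := pvChunks5 tokens
  match groups with
  | [] => []
  | g :: gs => gs.foldl (fun out group => out ++ ["<break>"] ++ group) g

-- ===== PRECONDITION & SPEC =====
def Spec_phonetic_encoder (s : String) (out : List String) : Prop := out = phonetic_encoder_alt s
instance (s : String) (out : List String) : Decidable (Spec_phonetic_encoder s out) := by unfold Spec_phonetic_encoder; infer_instance

-- ===== CLAIM (what is proved, stated in full; the proofs are below) =====
def Claim_equal_phonetic_encoder : Prop := ∀ (s : String), Dom_phonetic_encoder s → Spec_phonetic_encoder s (phonetic_encoder s)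

-- ===== LEMMAS AND PROOFS =====

-- the two token-building passes agree
theorem pvTokens_eq (cs : List Char) :
    cs.foldl (fun tokens ch =>
      match PySem.Dict.get? pvAlpha (PySem.Chars.lowerChar ch) with
      | some w => tokens ++ [w]
      | none => tokens) [] =
    cs.filterMap (fun ch => PySem.Dict.get? pvAlpha (PySem.Chars.lowerChar ch)) := by
  suffices h : ∀ acc, cs.foldl (fun tokens ch =>
      match PySem.Dict.get? pvAlpha (PySem.Chars.lowerChar ch) with
      | some w => tokens ++ [w]
      | none => tokens) acc =
      acc ++ cs.filterMap (fun ch => PySem.Dict.get? pvAlpha (PySem.Chars.lowerChar ch)) by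
    simpa using h []
  induction cs with
  | nil => simp
  | cons c cs ih =>
    intro acc
    cases h : PySem.Dict.get? pvAlpha (PySem.Chars.lowerChar c) <;>
      simp [List.foldl_cons, h, ih]

-- B's join, as a function of the chunk list
def pvJoin : List (List String) → List String
  | [] => []
  | g :: gs => gs.foldl (fun out group => out ++ ["<break>"] ++ group) g

theorem pvJoin_cons (g : List String) (gs : List (List String)) (hgs : gs ≠ []) :
    pvJoin (g :: gs) = g ++ ["<break>"] ++ pvJoin gs := by
  cases gs with
  | nil => exact absurd rfl hgs
  | cons g2 gs2 =>
    show (g2 :: gs2).foldl (fun out group => out ++ ["<break>"] ++ group) g = _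
    have h : ∀ (l : List (List String)) (a b : List String),
        l.foldl (fun out group => out ++ ["<break>"] ++ group) (a ++ b) =
        a ++ l.foldl (fun out group => out ++ ["<break>"] ++ group) b := by
      intro l
      induction l with
      | nil => intro a b; rfl
      | cons x xs ih =>
        intro a b
        have e : a ++ b ++ ["<break>"] ++ x = a ++ (b ++ ["<break>"] ++ x) := by simp
        rw [List.foldl_cons, List.foldl_cons, e]
        exact ih a (b ++ ["<break>"] ++ x)
    rw [List.foldl_cons]
    rw [h gs2 (g ++ ["<break>"]) g2]
    rfl

-- A's second loop written as a flatMap over indices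
def pvBody (ts : List String) (idx : Int) : List String :=
  [PySem.List.pyGetD ts idx ""] ++
    (if PySem.Int.mod (idx + 1) 5 == 0 && idx != (ts.length : Int) - 1 then ["<break>"] else [])

theorem pvALoop_eq_flatMap (ts : List String) :
    (PySem.List.pyRange 0 ts.length 1).foldl (fun out idx =>
      let out := out ++ [PySem.List.pyGetD ts idx ""]
      if PySem.Int.mod (idx + 1) 5 == 0 && idx != (ts.length : Int) - 1 then
        out ++ ["<break>"]
      else out) [] =
    (PySem.List.pyRange 0 ts.length 1).flatMap (pvBody ts) := by
  rw [PySem.List.foldl_congr_mem _ _ (fun acc x => acc ++ pvBody ts x) _ ?hfg]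
  · simpa using PySem.List.foldl_append_eq_flatMap (pvBody ts) (PySem.List.pyRange 0 ts.length 1) []
  case hfg =>
    intro acc x _
    simp only [pvBody]
    split <;> simp

-- pvBody has no break inside a chunk (index not ≡ 4 mod 5, or the very last index)
theorem pvBody_no_break (ts : List String) (i : Int)
    (h : (i + 1) % 5 ≠ 0 ∨ i = (ts.length : Int) - 1) :
    pvBody ts i = [PySem.List.pyGetD ts i ""] := by
  simp only [pvBody]
  rw [PySem.Int.mod_eq_emod_of_pos (by norm_num)]
  rcases h with h | h
  · simp [h]
  · simp [h]

theorem pvChunks5_cons (ts : List String) (h : ts ≠ []) :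
    pvChunks5 ts = ts.take 5 :: pvChunks5 (ts.drop 5) := by
  conv_lhs => rw [pvChunks5]
  rw [dif_neg h]

-- the core equivalence: flatMap over indices = chunked join, by strong induction on length
theorem pvCore (n : Nat) (ts : List String) (hn : ts.length = n) :
    (PySem.List.pyRange 0 ts.length 1).flatMap (pvBody ts) = pvJoin (pvChunks5 ts) := by
  induction n using Nat.strong_induction_on generalizing ts with
  | _ n ih =>
  by_cases hle : ts.length ≤ 5
  · -- a single (possibly empty) chunk: no break is emitted
    have hlhs : (PySem.List.pyRange 0 ts.length 1).flatMap (pvBody ts) = ts := by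
      rw [List.flatMap_def]
      rw [List.map_congr_left (g := fun i => [PySem.List.pyGetD ts i ""]) ?hpt]
      case hpt =>
        intro i hi
        rw [PySem.List.mem_pyRange_one] at hi
        apply pvBody_no_break ts i
        by_cases h4 : (i + 1) % 5 = 0
        · right; omega
        · left; exact h4
      calc ((PySem.List.pyRange 0 ts.length 1).map (fun i => [PySem.List.pyGetD ts i ""])).flatten
          = (PySem.List.pyRange 0 ts.length 1).map (fun i => PySem.List.pyGetD ts i "") := by
            rw [← List.flatMap_def]
            exact List.map_eq_flatMap.symm
        _ = ts := PySem.List.map_pyGetD_pyRange_zero' ts ""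
    by_cases hts : ts = []
    · subst hts
      rw [hlhs]
      simp [pvChunks5, pvJoin]
    · rw [hlhs, pvChunks5_cons ts hts]
      have hdrop : ts.drop 5 = [] := List.drop_eq_nil_of_le hle
      rw [hdrop, pvChunks5]
      simp [pvJoin, List.take_of_length_le hle]
  · -- more than one chunk: first chunk contributes take 5 ++ <break>, then recurse on drop 5
    have hgt : 5 < ts.length := by omega
    have hsplit : PySem.List.pyRange 0 (ts.length : Int) 1 =
        PySem.List.pyRange 0 5 1 ++ PySem.List.pyRange 5 (ts.length : Int) 1 :=
      PySem.List.pyRange_one_append 0 5 _ (by norm_num) (by exact_mod_cast Nat.le_of_lt hgt)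
    rw [hsplit, List.flatMap_append]
    -- first chunk
    have hfirst : (PySem.List.pyRange 0 5 1).flatMap (pvBody ts) = ts.take 5 ++ ["<break>"] := by
      have h5 : PySem.List.pyRange 0 5 1 = [0, 1, 2, 3, 4] := by decide
      rw [h5]
      have hb : ∀ i : Int, (i + 1) % 5 ≠ 0 → pvBody ts i = [PySem.List.pyGetD ts i ""] :=
        fun i h => pvBody_no_break ts i (Or.inl h)
      have hb4 : pvBody ts 4 = [PySem.List.pyGetD ts 4 "", "<break>"] := by
        simp only [pvBody]
        rw [PySem.Int.mod_eq_emod_of_pos (by norm_num)]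
        have hne : (4 : Int) ≠ (ts.length : Int) - 1 := by omega
        simp [hne]
      simp only [List.flatMap_cons, List.flatMap_nil, List.append_nil,
        hb 0 (by decide), hb 1 (by decide), hb 2 (by decide), hb 3 (by decide), hb4]
      -- evaluate the five indexings on an explicit 5-cons prefix
      rcases ts with _ | ⟨a, ts⟩; · simp at hgt
      rcases ts with _ | ⟨b, ts⟩; · simp at hgt
      rcases ts with _ | ⟨c, ts⟩; · simp at hgt
      rcases ts with _ | ⟨d, ts⟩; · simp at hgt
      rcases ts with _ | ⟨e, ts⟩; · simp at hgt
      simp only [PySem.List.pyGetD_ofNat']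
      rfl
    rw [hfirst]
    -- second chunk block: reindex by 5 and use the induction hypothesis
    have hdl : ((ts.drop 5).length : Int) = (ts.length : Int) - 5 := by
      simp [List.length_drop]; omega
    have hsecond : (PySem.List.pyRange 5 (ts.length : Int) 1).flatMap (pvBody ts) =
        (PySem.List.pyRange 0 ((ts.drop 5).length : Int) 1).flatMap (pvBody (ts.drop 5)) := by
      rw [PySem.List.pyRange_one 5 (ts.length : Int),
          PySem.List.pyRange_one 0 ((ts.drop 5).length : Int)]
      rw [List.flatMap_def, List.flatMap_def, List.map_map, List.map_map]
      congr 1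
      have hlen : ((ts.length : Int) - 5).toNat = (((ts.drop 5).length : Int) - 0).toNat := by omega
      rw [hlen]
      apply List.map_congr_left
      intro k hk
      rw [List.mem_range] at hk
      show pvBody ts (5 + (k : Int)) = pvBody (ts.drop 5) (0 + (k : Int))
      have hk' : k < ts.length - 5 := by omega
      simp only [pvBody]
      have hget : PySem.List.pyGetD ts (5 + (k : Int)) "" =
          PySem.List.pyGetD (ts.drop 5) (0 + (k : Int)) "" := by
        rw [PySem.List.pyGetD_eq_getElem ts "" (by omega) (by omega),
            PySem.List.pyGetD_eq_getElem (ts.drop 5) "" (by omega) (by rw [show ((ts.drop 5).length : Int) = (ts.length : Int) - 5 from hdl]; omega)]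
        have h1 : ((5 : Int) + (k : Int)).toNat = 5 + k := by omega
        have h2 : ((0 : Int) + (k : Int)).toNat = k := by omega
        simp only [h1, h2, List.getElem_drop]
      have hcond : ((PySem.Int.mod (5 + (k : Int) + 1) 5 == 0) && (5 + (k : Int) != (ts.length : Int) - 1)) =
          ((PySem.Int.mod (0 + (k : Int) + 1) 5 == 0) && (0 + (k : Int) != ((ts.drop 5).length : Int) - 1)) := by
        rw [PySem.Int.mod_eq_emod_of_pos (by norm_num), PySem.Int.mod_eq_emod_of_pos (by norm_num), hdl]
        have hm : (5 + (k : Int) + 1) % 5 = (0 + (k : Int) + 1) % 5 := by omega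
        rw [hm]
        by_cases he : (5 : Int) + (k : Int) = (ts.length : Int) - 1
        · rw [he, show (0 : Int) + (k : Int) = (ts.length : Int) - 5 - 1 from by omega]
          simp
        · have h1 : ((5 : Int) + (k : Int) != (ts.length : Int) - 1) = true := by
            simp [bne]; omega
          have h2 : ((0 : Int) + (k : Int) != (ts.length : Int) - 5 - 1) = true := by
            simp [bne]; omega
          rw [h1, h2]
      rw [hget, hcond]
    rw [hsecond]
    rw [ih (n - 5) (by omega) (ts.drop 5) (by simp [List.length_drop]; omega)]
    -- assemble: chunks of ts = take 5 :: chunks of drop 5, and the drop is nonempty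
    have hne : ts.drop 5 ≠ [] := by
      intro h
      have := congrArg List.length h
      simp [List.length_drop] at this
      omega
    rw [pvChunks5_cons ts (by intro h; rw [h] at hgt; simp at hgt)]
    rw [pvJoin_cons _ _ ?hcne]
    case hcne =>
      rw [pvChunks5_cons _ hne]
      exact List.cons_ne_nil _ _

-- ===== VERDICT (by name: the statement is the Claim_ definition above) =====
theorem phonetic_encoder_spec : Claim_equal_phonetic_encoder := by
  intro s _
  unfold Spec_phonetic_encoder phonetic_encoder phonetic_encoder_alt
  simp only []
  rw [pvTokens_eq, pvALoop_eq_flatMap, pvCore _ _ rfl]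
  rfl
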